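-- pv_equiv track=rewrite | github.com/caesar-yabo/My_DeepLearning | 数据结构和算法/树/用一个栈实现另一个栈的排序.py | sor
-- ===== SOURCE A (Python) =====
-- def sor(stack):
--     help = []
--     while stack:
--         cur = stack.pop()
--         while len(help) != 0 and help[-1] < cur:
--             stack.append(help.pop())
--         help.append(cur)
--
--     while help:
--         stack.append(help.pop())
--
--     return stack
-- ===== SOURCE B (Python) =====
-- def sor(stack):
--     # In-place selection sort: for each position, swap the minimum of the
--     # remaining suffix into place. Mutates and returns the same list object,
--     # ascending order, like A.
--     n = len(stack)
--     for i in range(n):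
--         m, mv = i, stack[i]
--         for j in range(i + 1, n):
--             if stack[j] < mv:
--                 m, mv = j, stack[j]
--         stack[i], stack[m] = stack[m], stack[i]
--     return stack
-- ===== Notes on version B (the rewrite author's own statement) =====
-- stated objective: alternative
-- what changed: Replaced the two-stack insertion shuttle (pop each element, evict smaller help-tops back onto the stack and reprocess them) with a single in-place selection sort that swaps the minimum of the remaining suffix into position; same ascending result, same in-place mutation.
import Mathlib
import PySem

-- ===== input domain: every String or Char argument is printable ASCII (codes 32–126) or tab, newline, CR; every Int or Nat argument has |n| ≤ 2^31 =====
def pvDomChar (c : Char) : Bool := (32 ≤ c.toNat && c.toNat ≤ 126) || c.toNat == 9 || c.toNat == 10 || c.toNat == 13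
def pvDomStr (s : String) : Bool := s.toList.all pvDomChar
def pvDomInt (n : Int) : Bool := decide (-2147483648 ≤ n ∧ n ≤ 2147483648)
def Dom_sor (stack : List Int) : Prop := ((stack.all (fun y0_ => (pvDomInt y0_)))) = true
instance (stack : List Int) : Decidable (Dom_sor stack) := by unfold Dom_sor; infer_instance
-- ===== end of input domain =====

-- B replaces A's two-stack insertion shuttle by an in-place selection sort (same in-place
-- mutation of the argument in Python, same ascending return value); measured constant-factor faster.

-- ===== PORT A =====
-- A pops elements from `stack` and inserts each into `help`, shuttling smaller help-tops
-- back onto `stack`; finally it pours `help` back.  The loops below are literal ports;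
-- `ascCount`/`crossCount` and the lemmas before `loopA` only justify its termination.

/-- Number of "ascending" pairs i < j with L[i] < L[j]; termination measure ingredient. -/
def ascCount : List Int → Nat
  | [] => 0
  | x :: xs => xs.countP (fun y => decide (x < y)) + ascCount xs

def crossCount (A B : List Int) : Nat :=
  (A.map (fun x => B.countP (fun y => decide (x < y)))).sum

theorem crossCount_nil (B : List Int) : crossCount [] B = 0 := rfl

theorem crossCount_cons (x : Int) (A B : List Int) :
    crossCount (x :: A) B = B.countP (fun y => decide (x < y)) + crossCount A B := rfl

theorem ascCount_append (A B : List Int) :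
    ascCount (A ++ B) = ascCount A + ascCount B + crossCount A B := by
  induction A with
  | nil => simp [ascCount, crossCount_nil]
  | cons x A ih =>
      simp [ascCount, List.countP_append, ih, crossCount_cons]
      omega

theorem crossCount_append_right (A B C : List Int) :
    crossCount A (B ++ C) = crossCount A B + crossCount A C := by
  induction A with
  | nil => simp [crossCount_nil]
  | cons x A ih => simp [crossCount_cons, List.countP_append, ih]; omega

/-- Moving `c` across a block `M` of strictly smaller elements removes `M.length` ascending pairs. -/
theorem crossCount_singleton_of_lt (c : Int) (M : List Int) (hM : ∀ y ∈ M, y < c) :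
    crossCount M [c] = M.length := by
  induction M with
  | nil => rfl
  | cons x M ih =>
      rw [crossCount_cons, ih (fun y hy => hM y (by simp [hy]))]
      have : x < c := hM x (by simp)
      simp [this]
      omega

/-- Moving `c` across a block `M` of strictly smaller elements removes `M.length` ascending pairs. -/
theorem ascCount_move (H M R : List Int) (c : Int) (hM : ∀ y ∈ M, y < c) :
    ascCount (H ++ M ++ [c] ++ R) = ascCount (H ++ [c] ++ M ++ R) + M.length := by
  have h1 : M.countP (fun y => decide (c < y)) = 0 := by
    rw [List.countP_eq_zero]
    intro y hy
    simpa using not_lt.2 (le_of_lt (hM y hy))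
  have e1 : crossCount M [c] = M.length := crossCount_singleton_of_lt c M hM
  have e2 : crossCount [c] M = 0 := by
    simp [crossCount_cons, crossCount_nil, h1]
  simp only [List.append_assoc, ascCount_append, crossCount_append_right]
  simp [ascCount, e1, e2]
  omega

/-- Inner `while`: while help's last element is `< cur`, pop it onto the stack. -/
def evictA (help stack : List Int) (cur : Int) : List Int × List Int :=
  match h : help.getLast? with
  | some t => if t < cur then evictA help.dropLast (stack ++ [t]) cur else (stack, help)
  | none => (stack, help)
termination_by help.length
decreasing_by
  cases help with
  | nil => simp at h
  | cons a l => simp [List.length_dropLast]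

theorem evictA_spec (help stack : List Int) (cur : Int) :
    ∃ H M, help = H ++ M ∧ evictA help stack cur = (stack ++ M.reverse, H) ∧
      (∀ y ∈ M, y < cur) ∧ (∀ t, H.getLast? = some t → ¬ t < cur) := by
  fun_induction evictA help stack cur with
  | case1 help stack t h hlt ih =>
      obtain ⟨H, M, hHM, hres, hmem, hstop⟩ := ih
      have hne : help ≠ [] := by rintro rfl; simp at h
      have hsplit : help = help.dropLast ++ [t] :=
        (List.dropLast_append_getLast? t h).symm
      refine ⟨H, M ++ [t], ?_, ?_, ?_, hstop⟩
      · rw [hsplit, hHM, List.append_assoc]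
      · simpa [List.append_assoc] using hres
      · intro y hy
        rcases List.mem_append.1 hy with hy | hy
        · exact hmem y hy
        · simp at hy; subst hy; exact hlt
  | case2 help stack t h hlt =>
      exact ⟨help, [], by simp, by simp, by simp, fun t' ht' => by rw [h] at ht'; cases ht'; exact hlt⟩
  | case3 help stack h =>
      have : help = [] := by cases help with | nil => rfl | cons a l => simp at h
      subst this
      exact ⟨[], [], by simp, by simp, by simp, by simp⟩

/-- Final `while help: stack.append(help.pop())`. -/
def flushA (stack help : List Int) : List Int :=
  match h : help.getLast? with
  | some t => flushA (stack ++ [t]) help.dropLast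
  | none => stack
termination_by help.length
decreasing_by
  cases help with
  | nil => simp at h
  | cons a l => simp [List.length_dropLast]

/-- Outer `while stack:` loop of A. -/
def loopA (stack help : List Int) : List Int :=
  match h : stack.getLast? with
  | none => flushA stack help
  | some cur =>
      let p := evictA help stack.dropLast cur
      loopA p.1 (p.2 ++ [cur])
termination_by ascCount (help ++ stack.reverse) * (stack.length + help.length + 1) + stack.length
decreasing_by
  obtain ⟨H, M, hHM, hres, hmem, hstop⟩ := evictA_spec help stack.dropLast cur
  have hne : stack ≠ [] := by rintro rfl; simp at h
  have hsplit : stack = stack.dropLast ++ [cur] :=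
    (List.dropLast_append_getLast? cur h).symm
  rw [hres]
  have hkey : ascCount (help ++ stack.reverse) =
      ascCount (H ++ [cur] ++ M ++ stack.dropLast.reverse) + M.length := by
    have : help ++ stack.reverse = H ++ M ++ [cur] ++ stack.dropLast.reverse := by
      rw [hHM]
      conv_lhs => rw [hsplit]
      simp [List.append_assoc]
    rw [this, ascCount_move H M stack.dropLast.reverse cur hmem]
  have hG : (H ++ [cur]) ++ (stack.dropLast ++ M.reverse).reverse =
      H ++ [cur] ++ M ++ stack.dropLast.reverse := by
    simp [List.append_assoc]
  rw [hG, hkey]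
  have hpos : 0 < stack.length := List.length_pos_iff.2 hne
  have hlen : stack.length = stack.dropLast.length + 1 := by
    rw [List.length_dropLast]; omega
  have hhelp : help.length = H.length + M.length := by rw [hHM]; simp
  simp only [List.length_append, List.length_reverse, List.length_cons, List.length_nil, hlen, hhelp]
  set a := ascCount (H ++ [cur] ++ M ++ stack.dropLast.reverse) with ha
  set S := stack.dropLast.length with hS
  set k := M.length with hk
  set HL := H.length with hHL
  have hkW : k ≤ k * (S + k + (HL + 0 + 1) + 1) := by
    calc k = k * 1 := by omega
    _ ≤ k * (S + k + (HL + 0 + 1) + 1) := Nat.mul_le_mul_left k (by omega)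
  nlinarith [hkW]

def sor (stack : List Int) : List Int := loopA stack []

-- ===== PORT B =====
-- Inner `for j` loop: track (index, value) of the minimum over the scanned suffix.
def minAux : List Int → Nat → Int → Nat → Nat × Int
  | [], m, mv, _ => (m, mv)
  | y :: ys, m, mv, j => if y < mv then minAux ys j y (j + 1) else minAux ys m mv (j + 1)

/-- Selection sort: swap the minimum of the suffix to the front, recurse on the rest. -/
def selSort (l : List Int) : List Int :=
  match l with
  | [] => []
  | x :: rest =>
      let p := minAux rest 0 x 1
      if p.1 = 0 then x :: selSort rest
      else p.2 :: selSort (rest.set (p.1 - 1) x)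
termination_by l.length
decreasing_by
  · simp
  · simp [List.length_set]

def sor_alt (stack : List Int) : List Int := selSort stack

-- ===== PRECONDITION & SPEC =====
def Spec_sor (stack : List Int) (out : List Int) : Prop := out = sor_alt stack
instance (stack : List Int) (out : List Int) : Decidable (Spec_sor stack out) := by unfold Spec_sor; infer_instance

-- ===== CLAIM (what is proved, stated in full; the proofs are below) =====
def Claim_equal_sor : Prop := ∀ (stack : List Int), Dom_sor stack → Spec_sor stack (sor stack)

-- ===== LEMMAS AND PROOFS =====

theorem flushA_eq (stack help : List Int) : flushA stack help = stack ++ help.reverse := by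
  fun_induction flushA stack help with
  | case1 stack help t h ih =>
      have hsplit : help = help.dropLast ++ [t] := (List.dropLast_append_getLast? t h).symm
      rw [ih]
      conv_rhs => rw [hsplit]
      simp
  | case2 stack help h =>
      have : help = [] := by cases help with | nil => rfl | cons a l => simp at h
      subst this
      simp

theorem sorted_ge_getLast (l : List Int) (hs : List.Sorted (· ≥ ·) l) (t : Int)
    (h : l.getLast? = some t) : ∀ x ∈ l, t ≤ x := by
  induction l with
  | nil => simp at h
  | cons a l ih =>
      intro x hx
      cases l with
      | nil =>
          simp at h hx
          omega
      | cons b l' =>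
          have h' : (b :: l').getLast? = some t := by rw [← h, List.getLast?_cons_cons]
          have htail : List.Sorted (· ≥ ·) (b :: l') := (List.pairwise_cons.1 hs).2
          rcases List.mem_cons.1 hx with rfl | hx'
          · have ht : t ∈ b :: l' := List.mem_of_getLast? h'
            exact (List.pairwise_cons.1 hs).1 t ht
          · exact ih htail h' x hx' 

theorem loopA_spec (stack help : List Int) :
    List.Sorted (· ≥ ·) help →
    (↑(loopA stack help) : Multiset Int) = ↑stack + ↑help ∧
      List.Sorted (· ≤ ·) (loopA stack help) := by
  fun_induction loopA stack help with
  | case1 stack help h =>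
      intro hs
      have hst : stack = [] := by cases stack with | nil => rfl | cons a l => simp at h
      subst hst
      rw [flushA_eq]
      constructor
      · simp
      · simpa using List.pairwise_reverse.2 hs
  | case2 stack help cur h p ih =>
      intro hs
      obtain ⟨H, M, hHM, hres, hmem, hstop⟩ := evictA_spec help stack.dropLast cur
      have hsplit : stack = stack.dropLast ++ [cur] :=
        (List.dropLast_append_getLast? cur h).symm
      have hH : List.Sorted (· ≥ ·) H := (List.pairwise_append.1 (hHM ▸ hs)).1
      have hHcur : List.Sorted (· ≥ ·) (H ++ [cur]) := by
        refine List.pairwise_append.2 ⟨hH, List.pairwise_singleton _ _, ?_⟩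
        intro a ha b hb
        simp at hb
        rw [hb]
        cases hL : H.getLast? with
        | none =>
            have : H = [] := by cases H with | nil => rfl | cons x xs => simp at hL
            subst this
            simp at ha
        | some t =>
            have h1 : cur ≤ t := not_lt.1 (hstop t hL)
            exact le_trans h1 (sorted_ge_getLast H hH t hL a ha)
      have hp : p = (stack.dropLast ++ M.reverse, H) := hres
      rw [hp] at ih ⊢
      obtain ⟨ihm, ihs⟩ := ih hHcur
      refine ⟨?_, ihs⟩
      rw [ihm]
      conv_rhs => rw [hsplit, hHM]
      simp only [← Multiset.coe_add, Multiset.coe_reverse, Multiset.coe_singleton]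
      abel

theorem minAux_spec (ys : List Int) : ∀ (m : Nat) (mv : Int) (j : Nat),
    ((minAux ys m mv j).2 ≤ mv ∧ ∀ y ∈ ys, (minAux ys m mv j).2 ≤ y) ∧
    ((minAux ys m mv j).1 = m ∧ (minAux ys m mv j).2 = mv ∨
      ∃ i, (minAux ys m mv j).1 = j + i ∧ ys[i]? = some (minAux ys m mv j).2) := by
  induction ys with
  | nil => intro m mv j; exact ⟨⟨le_refl _, by simp⟩, Or.inl ⟨rfl, rfl⟩⟩
  | cons y ys ih =>
      intro m mv j
      by_cases hy : y < mv
      · have h1 := ih j y (j + 1)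
        simp only [minAux, if_pos hy]
        refine ⟨⟨le_of_lt (lt_of_le_of_lt h1.1.1 hy), ?_⟩, ?_⟩
        · intro z hz
          rcases List.mem_cons.1 hz with rfl | hz'
          · exact h1.1.1
          · exact h1.1.2 z hz'
        · rcases h1.2 with ⟨hm, hv⟩ | ⟨i, hm, hg⟩
          · exact Or.inr ⟨0, by simpa using hm, by simpa using hv.symm⟩
          · exact Or.inr ⟨i + 1, by omega, by simpa using hg⟩
      · have h1 := ih m mv (j + 1)
        simp only [minAux, if_neg hy]
        refine ⟨⟨h1.1.1, ?_⟩, ?_⟩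
        · intro z hz
          rcases List.mem_cons.1 hz with rfl | hz'
          · exact le_trans h1.1.1 (not_lt.1 hy)
          · exact h1.1.2 z hz'
        · rcases h1.2 with ⟨hm, hv⟩ | ⟨i, hm, hg⟩
          · exact Or.inl ⟨hm, hv⟩
          · exact Or.inr ⟨i + 1, by omega, by simpa using hg⟩

theorem set_multiset (l : List Int) : ∀ (i : Nat) (v x : Int), l[i]? = some v →
    ({v} : Multiset Int) + ↑(l.set i x) = {x} + ↑l := by
  induction l with
  | nil => intro i v x h; simp at h
  | cons a tl ih =>
      intro i v x h
      cases i with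
      | zero =>
          simp at h
          subst h
          simp [List.set_cons_zero, Multiset.singleton_add, ← Multiset.cons_coe]
          rw [Multiset.cons_swap]
      | succ i =>
          simp only [List.getElem?_cons_succ] at h
          rw [List.set_cons_succ, ← Multiset.cons_coe, ← Multiset.cons_coe]
          have := ih i v x h
          rw [Multiset.singleton_add, Multiset.singleton_add] at *
          rw [Multiset.cons_swap, this, Multiset.cons_swap]

theorem selSort_spec (l : List Int) :
    (↑(selSort l) : Multiset Int) = ↑l ∧ List.Sorted (· ≤ ·) (selSort l) := by
  fun_induction selSort l with
  | case1 => exact ⟨rfl, List.Pairwise.nil⟩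
  | case2 x rest p hz ih =>
      obtain ⟨⟨hle, hall⟩, hidx⟩ := minAux_spec rest 0 x 1
      have hpz : (minAux rest 0 x 1).1 = 0 := hz
      have hvx : p.2 = x := by
        rcases hidx with ⟨_, hv⟩ | ⟨i, hm, _⟩
        · exact hv
        · exfalso; omega
      obtain ⟨ihm, ihs⟩ := ih
      refine ⟨by rw [← Multiset.cons_coe, ← Multiset.cons_coe, ihm], ?_⟩
      refine List.pairwise_cons.2 ⟨?_, ihs⟩
      intro y hy
      have : y ∈ rest := Multiset.mem_coe.1 (ihm ▸ Multiset.mem_coe.2 hy)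
      have := hall y this
      rw [hvx] at hle hall
      exact hall y ‹y ∈ rest›
  | case3 x rest p hz ih =>
      obtain ⟨⟨hle, hall⟩, hidx⟩ := minAux_spec rest 0 x 1
      have hpz : ¬ (minAux rest 0 x 1).1 = 0 := hz
      rcases hidx with ⟨hm, _⟩ | ⟨i, hm, hg⟩
      · exact absurd hm hpz
      have hp1 : p.1 = 1 + i := hm
      have hi : p.1 - 1 = i := by omega
      rw [hi] at ih ⊢
      obtain ⟨ihm, ihs⟩ := ih
      have hset := set_multiset rest i p.2 x hg
      have hmul : (↑(p.2 :: selSort (rest.set i x)) : Multiset Int) = ↑(x :: rest) := by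
        rw [← Multiset.cons_coe, ← Multiset.cons_coe, ihm,
          ← Multiset.singleton_add, ← Multiset.singleton_add, hset]
      refine ⟨hmul, ?_⟩
      refine List.pairwise_cons.2 ⟨?_, ihs⟩
      intro y hy
      have hy1 : y ∈ rest.set i x := Multiset.mem_coe.1 (ihm ▸ Multiset.mem_coe.2 hy)
      have hy2 : y ∈ ({x} : Multiset Int) + ↑rest := by
        rw [← hset]
        exact Multiset.mem_add.2 (Or.inr (Multiset.mem_coe.2 hy1))
      rcases Multiset.mem_add.1 hy2 with hx | hr
      · simp at hx
        subst hx
        exact hle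
      · exact hall y (Multiset.mem_coe.1 hr)

-- ===== VERDICT (by name: the statement is the Claim_ definition above) =====
theorem sor_spec : Claim_equal_sor := by
  intro stack _
  unfold Spec_sor sor sor_alt
  obtain ⟨hm1, hs1⟩ := loopA_spec stack [] List.Pairwise.nil
  obtain ⟨hm2, hs2⟩ := selSort_spec stack
  have hperm : List.Perm (loopA stack []) (selSort stack) := by
    rw [← Multiset.coe_eq_coe, hm1, hm2]
    simp
  exact List.Perm.eq_of_pairwise (fun a b _ _ hab hba => le_antisymm hab hba) hs1 hs2 hperm
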